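-- pv_equiv track=rewrite | github.com/nicoacrespo04-wq/Nike_Scrapper_Final | codigo_usa.py | canonicalize_goretex_in_tokens
-- ===== SOURCE A (Python) =====
-- from typing import Dict, Any, List, Optional, Set, Tuple
--
-- def canonicalize_goretex_in_tokens(tokens: List[str]) -> List[str]:
--     if not tokens:
--         return tokens
--     out = []
--     i = 0
--     while i < len(tokens):
--         if i + 1 < len(tokens) and tokens[i] == "gore" and tokens[i + 1] == "tex":
--             out.append("gtx")
--             i += 2
--             continue
--         if tokens[i] in ("goretex", "gore-tex"):
--             out.append("gtx")
--             i += 1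
--             continue
--         out.append(tokens[i])
--         i += 1
--     return out
-- ===== SOURCE B (Python) =====
-- from typing import List
--
-- def canonicalize_goretex_in_tokens(tokens: List[str]) -> List[str]:
--     if not tokens:
--         return tokens
--     out = []
--     pending = False  # a 'gore' token seen, waiting to know if 'tex' follows
--     for t in tokens:
--         if pending:
--             pending = False
--             if t == "tex":
--                 out.append("gtx")
--                 continue
--             out.append("gore")
--         if t == "gore":
--             pending = True
--         elif t in ("goretex", "gore-tex"):
--             out.append("gtx")
--         else:
--             out.append(t)
--     if pending:
--         out.append("gore")
--     return out
-- ===== Notes on version B (the rewrite author's own statement) =====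
-- stated objective: simpler
-- what changed: Replaced the index-based while loop with i+1 lookahead and i+=2 skips by a single for-each pass that carries a 'pending gore' flag resolved at the next token (flushed after the loop); the measured speedup is constant-factor (direct iteration instead of repeated len() checks and indexing).
import Mathlib
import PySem

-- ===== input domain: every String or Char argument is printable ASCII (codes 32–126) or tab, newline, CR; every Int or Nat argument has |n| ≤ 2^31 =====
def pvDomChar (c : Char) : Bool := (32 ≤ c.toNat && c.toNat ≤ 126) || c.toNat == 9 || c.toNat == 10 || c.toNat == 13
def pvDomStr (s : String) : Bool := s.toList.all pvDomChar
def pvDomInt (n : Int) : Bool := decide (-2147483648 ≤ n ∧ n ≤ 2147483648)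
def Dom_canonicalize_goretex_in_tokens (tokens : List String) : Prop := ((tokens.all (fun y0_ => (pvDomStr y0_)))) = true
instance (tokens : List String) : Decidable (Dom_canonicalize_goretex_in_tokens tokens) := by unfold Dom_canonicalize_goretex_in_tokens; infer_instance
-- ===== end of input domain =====

-- B replaces A's index+lookahead while loop by one forward pass carrying a 'pending gore' flag (same values; objective: simpler).


-- ===== PORT A =====
-- the while loop over state (i, out); tokens[i] reads are in range, rendered with getD
def canonGtxLoopA (tokens : List String) (i : Nat) (out : List String) : List String :=
  if _h : i < tokens.length then
    if i + 1 < tokens.length ∧ tokens.getD i "" = "gore" ∧ tokens.getD (i+1) "" = "tex" then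
      canonGtxLoopA tokens (i+2) (out ++ ["gtx"])
    else if tokens.getD i "" = "goretex" ∨ tokens.getD i "" = "gore-tex" then
      canonGtxLoopA tokens (i+1) (out ++ ["gtx"])
    else
      canonGtxLoopA tokens (i+1) (out ++ [tokens.getD i ""])
  else out
termination_by tokens.length - i

def canonicalize_goretex_in_tokens (tokens : List String) : List String :=
  if tokens = [] then tokens
  else canonGtxLoopA tokens 0 []

-- ===== PORT B =====
-- one forward pass; `pending` records a 'gore' waiting to see if 'tex' follows
def canonGtxLoopB : List String → Bool → List String
  | [], pending => if pending then ["gore"] else []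
  | t :: rest, false =>
      if t = "gore" then canonGtxLoopB rest true
      else if t = "goretex" ∨ t = "gore-tex" then "gtx" :: canonGtxLoopB rest false
      else t :: canonGtxLoopB rest false
  | t :: rest, true =>
      if t = "tex" then "gtx" :: canonGtxLoopB rest false
      else if t = "gore" then "gore" :: canonGtxLoopB rest true
      else if t = "goretex" ∨ t = "gore-tex" then "gore" :: "gtx" :: canonGtxLoopB rest false
      else "gore" :: t :: canonGtxLoopB rest false

def canonicalize_goretex_in_tokens_alt (tokens : List String) : List String :=
  if tokens = [] then tokens
  else canonGtxLoopB tokens false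

-- ===== PRECONDITION & SPEC =====
def Spec_canonicalize_goretex_in_tokens (tokens : List String) (out : List String) : Prop := out = canonicalize_goretex_in_tokens_alt tokens
instance (tokens : List String) (out : List String) : Decidable (Spec_canonicalize_goretex_in_tokens tokens out) := by unfold Spec_canonicalize_goretex_in_tokens; infer_instance

-- ===== CLAIM (what is proved, stated in full; the proofs are below) =====
def Claim_equal_canonicalize_goretex_in_tokens : Prop := ∀ (tokens : List String), Dom_canonicalize_goretex_in_tokens tokens → Spec_canonicalize_goretex_in_tokens tokens (canonicalize_goretex_in_tokens tokens)

-- ===== LEMMAS AND PROOFS =====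

-- the common list-shaped description of the result (structural recursion)
def canonGtxRef : List String → List String
  | [] => []
  | [t] => if t = "goretex" ∨ t = "gore-tex" then ["gtx"] else [t]
  | t :: u :: rest =>
      if t = "gore" ∧ u = "tex" then "gtx" :: canonGtxRef rest
      else if t = "goretex" ∨ t = "gore-tex" then "gtx" :: canonGtxRef (u :: rest)
      else t :: canonGtxRef (u :: rest)

theorem loopA_eq_ref (tokens : List String) :
    ∀ i out, canonGtxLoopA tokens i out = out ++ canonGtxRef (tokens.drop i) := by
  intro i
  induction hk : tokens.length - i using Nat.strong_induction_on generalizing i with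
  | _ k ih =>
    intro out
    rw [canonGtxLoopA]
    by_cases h : i < tokens.length
    · have hdrop : tokens.drop i = tokens.getD i "" :: tokens.drop (i+1) := by
        rw [List.drop_eq_getElem_cons h]
        simp [List.getD_eq_getElem?_getD, List.getElem?_eq_getElem h]
      simp only [h, dif_pos]
      by_cases hlen : i + 1 < tokens.length
      · have hdrop1 : tokens.drop (i+1) = tokens.getD (i+1) "" :: tokens.drop (i+2) := by
          rw [show i + 2 = (i+1) + 1 from by omega, List.drop_eq_getElem_cons hlen]
          simp [List.getD_eq_getElem?_getD, List.getElem?_eq_getElem hlen]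
        rw [hdrop, hdrop1, canonGtxRef]
        by_cases h1 : tokens.getD i "" = "gore" ∧ tokens.getD (i+1) "" = "tex"
        · rw [if_pos ⟨hlen, h1.1, h1.2⟩, if_pos h1,
            ih (tokens.length - (i+2)) (by omega) (i+2) rfl]
          simp
        · rw [if_neg (by rintro ⟨_, h2, h3⟩; exact h1 ⟨h2, h3⟩), if_neg h1]
          by_cases h2 : tokens.getD i "" = "goretex" ∨ tokens.getD i "" = "gore-tex"
          · rw [if_pos h2, if_pos h2, ih (tokens.length - (i+1)) (by omega) (i+1) rfl, hdrop1]
            simp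
          · rw [if_neg h2, if_neg h2, ih (tokens.length - (i+1)) (by omega) (i+1) rfl, hdrop1]
            simp
      · have hnil1 : tokens.drop (i+1) = [] := List.drop_eq_nil_of_le (by omega)
        rw [hdrop, hnil1, canonGtxRef]
        rw [if_neg (by rintro ⟨h2, _⟩; exact hlen h2)]
        by_cases h2 : tokens.getD i "" = "goretex" ∨ tokens.getD i "" = "gore-tex"
        · rw [if_pos h2, if_pos h2, ih (tokens.length - (i+1)) (by omega) (i+1) rfl, hnil1,
            canonGtxRef]
          simp
        · rw [if_neg h2, if_neg h2, ih (tokens.length - (i+1)) (by omega) (i+1) rfl, hnil1,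
            canonGtxRef]
          simp
    · have hnil : tokens.drop i = [] := List.drop_eq_nil_of_le (by omega)
      simp [h, hnil, canonGtxRef]

theorem ref_eq_loopB : ∀ (xs : List String),
    canonGtxRef xs = canonGtxLoopB xs false ∧ canonGtxRef ("gore" :: xs) = canonGtxLoopB xs true := by
  intro xs
  induction hn : xs.length using Nat.strong_induction_on generalizing xs with
  | _ n ih =>
    match xs with
    | [] =>
      refine ⟨by simp [canonGtxRef, canonGtxLoopB], ?_⟩
      simp [canonGtxRef, canonGtxLoopB]
    | [t] =>
      constructor
      · by_cases hg : t = "gore"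
        · subst hg; simp [canonGtxRef, canonGtxLoopB]
        · by_cases h2 : t = "goretex" ∨ t = "gore-tex"
          · rcases h2 with h2 | h2 <;> subst h2 <;> simp [canonGtxRef, canonGtxLoopB]
          · simp [canonGtxRef, canonGtxLoopB, hg, h2]
      · by_cases ht : t = "tex"
        · subst ht; simp [canonGtxRef, canonGtxLoopB]
        · by_cases hg : t = "gore"
          · subst hg; simp [canonGtxRef, canonGtxLoopB]
          · by_cases h2 : t = "goretex" ∨ t = "gore-tex"
            · rcases h2 with h2 | h2 <;> subst h2 <;> simp [canonGtxRef, canonGtxLoopB]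
            · simp [canonGtxRef, canonGtxLoopB, ht, hg, h2]
    | t :: u :: rest =>
      have ih1 := ih rest.length (by simp [← hn]; try omega) rest rfl
      have ih2 := ih (u :: rest).length (by simp [← hn]) (u :: rest) rfl
      have hp1 : canonGtxRef (t :: u :: rest) = canonGtxLoopB (t :: u :: rest) false := by
        by_cases hg : t = "gore"
        · subst hg
          by_cases ht : u = "tex"
          · subst ht
            rw [canonGtxRef, if_pos ⟨rfl, rfl⟩]
            simp [canonGtxLoopB, ih1.1]
          · rw [show canonGtxLoopB ("gore" :: u :: rest) false = canonGtxLoopB (u :: rest) true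
              from by simp [canonGtxLoopB]]
            exact ih2.2
        · rw [canonGtxRef, if_neg (by rintro ⟨h1, _⟩; exact hg h1)]
          by_cases h2 : t = "goretex" ∨ t = "gore-tex"
          · rw [if_pos h2, show canonGtxLoopB (t :: u :: rest) false
              = "gtx" :: canonGtxLoopB (u :: rest) false from by simp [canonGtxLoopB, hg, h2],
              ih2.1]
          · rw [if_neg h2, show canonGtxLoopB (t :: u :: rest) false
              = t :: canonGtxLoopB (u :: rest) false from by simp [canonGtxLoopB, hg, h2],
              ih2.1]
      refine ⟨hp1, ?_⟩
      by_cases ht : t = "tex"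
      · subst ht
        rw [canonGtxRef, if_pos ⟨rfl, rfl⟩]
        simp [canonGtxLoopB, ih2.1]
      · have href : canonGtxRef ("gore" :: t :: u :: rest) = "gore" :: canonGtxRef (t :: u :: rest) := by
          rw [canonGtxRef, if_neg (by rintro ⟨_, h2⟩; exact ht h2), if_neg (by simp)]
        rw [href, hp1]
        by_cases hg : t = "gore"
        · subst hg; simp [canonGtxLoopB]
        · by_cases h2 : t = "goretex" ∨ t = "gore-tex"
          · rcases h2 with h2 | h2 <;> subst h2 <;> simp [canonGtxLoopB]
          · simp [canonGtxLoopB, ht, hg, h2]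

-- ===== VERDICT (by name: the statement is the Claim_ definition above) =====
theorem canonicalize_goretex_in_tokens_spec : Claim_equal_canonicalize_goretex_in_tokens := by
  intro tokens _
  unfold Spec_canonicalize_goretex_in_tokens canonicalize_goretex_in_tokens canonicalize_goretex_in_tokens_alt
  by_cases h : tokens = []
  · simp [h]
  · rw [if_neg h, if_neg h, loopA_eq_ref tokens 0 [], List.drop_zero, (ref_eq_loopB tokens).1]
    simp
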